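-- pv_equiv track=rewrite | github.com/elio-samaha/tme-2-vigenere | cryptanalyse_vigenere.py | clef_par_decalages
-- ===== SOURCE A (Python) =====
-- from collections import Counter
--
-- alphabet = "ABCDEFGHIJKLMNOPQRSTUVWXYZ"
--
-- def freq(txt):
--     """
--     rend la liste des occurences des lettre de l alphabet dans le texte txt
--     """
--     Occurences = Counter(txt)
--     hist=[0.0]*len(alphabet)
--     for i , lettre in enumerate(alphabet): # indice , lettre
--         hist[i] = Occurences[lettre]
--     return hist
--
-- def lettre_freq_max(txt):
--     """
--     donne  l indice de l element qui a le nombre d'occurence maximale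
--     """
--     occ = freq(txt)
--     m = max(occ)
--     for i , l in enumerate(occ):
--         if l == m:
--             return i
--     return -1
--
-- def clef_par_decalages(cipher, key_length):
--     """
--     rend une liste contenant la clef i.e chaque element i de la liste est le decalage de la colonne i
--     """
--     decalages=[0]*key_length
--
--     li = [[] for _ in range(key_length)] # chaque element de la liste est une colonne
--     for ind , let in enumerate(cipher):
--         li[ind % key_length].append(let)           #mettre les elements selon leur module avec key
--     li = ["".join(e) for e in li]   #conversion en liste de chaine de charactere
--     for i in range(key_length):
--         decalages[i] = (lettre_freq_max(li[i]) - 4) % 26                # E ---> µ donc dec = µ - E mod 26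
--
--     return decalages
-- ===== SOURCE B (Python) =====
-- def clef_par_decalages(cipher, key_length):
--     """For each column, take the argmax over the 26 letters directly (max with a
--     count key over the strided positions range(i, n, key_length)): no column
--     buckets, no histogram/Counter is ever built."""
--     alphabet = "ABCDEFGHIJKLMNOPQRSTUVWXYZ"
--     n = len(cipher)
--     return [
--         (max(range(26),
--              key=lambda j: sum(1 for p in range(i, n, key_length)
--                                if cipher[p] == alphabet[j])) - 4) % 26
--         for i in range(key_length)
--     ]
-- ===== Notes on version B (the rewrite author's own statement) =====
-- stated objective: alternative
-- what changed: Instead of partitioning the cipher into column lists, joining them and building a Counter histogram per column then scanning for the first max, B never builds columns or a frequency table: per column it takes max(range(26), key=...) directly, counting each candidate letter on demand over the strided positions range(i, n, key_length).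
import Mathlib
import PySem

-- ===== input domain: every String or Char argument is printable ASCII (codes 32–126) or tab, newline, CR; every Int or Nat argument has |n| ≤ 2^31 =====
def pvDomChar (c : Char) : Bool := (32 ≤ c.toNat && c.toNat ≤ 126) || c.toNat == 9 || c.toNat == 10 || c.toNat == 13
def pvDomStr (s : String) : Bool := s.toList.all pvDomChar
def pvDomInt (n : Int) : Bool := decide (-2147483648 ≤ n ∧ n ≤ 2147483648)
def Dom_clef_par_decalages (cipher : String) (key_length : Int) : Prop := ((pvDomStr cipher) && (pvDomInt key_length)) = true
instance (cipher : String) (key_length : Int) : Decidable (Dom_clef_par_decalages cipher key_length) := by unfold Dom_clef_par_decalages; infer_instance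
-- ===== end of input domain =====

-- B drops A's whole pipeline (partition into column lists, join, Counter histogram, max, index
-- scan): it takes, per column, the argmax over the 26 letters directly, with the count of each
-- letter computed on demand over the strided positions range(i, n, key_length).
-- Objective: alternative (no bucket lists and no frequency table are ever built; not faster).

-- ===== PORT A =====
def pvAlphabet : List Char := "ABCDEFGHIJKLMNOPQRSTUVWXYZ".toList

-- freq(txt): Counter(txt), then hist[i] = Occurences[lettre] for each alphabet letter
def pvFreq (txt : List Char) : List Int :=
  let occurences := PySem.Dict.counter txt
  pvAlphabet.map (fun lettre => occurences.getD lettre 0)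

-- lettre_freq_max(txt): m = max(occ); first index i with occ[i] == m, else -1
-- (occ always has 26 entries, so Python's max never sees an empty list; the `none`
--  branch of max? is unreachable and ports the would-be ValueError as -1)
def pvLettreFreqMax (txt : List Char) : Int :=
  let occ := pvFreq txt
  match PySem.List.max? occ (fun x => x) with
  | none => -1
  | some m =>
    match PySem.List.index? occ m with
    | some i => (i : Int)
    | none => -1

-- li[ind % key_length].append(let)
def pvColAppend (li : List (List Char)) (i : Int) (c : Char) : List (List Char) :=
  PySem.List.pySetD li i (PySem.List.pyGetD li i [] ++ [c])

def clef_par_decalages (cipher : String) (key_length : Int) : List Int :=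
  let li0 : List (List Char) := (PySem.List.pyRange 0 key_length 1).map (fun _ => [])
  let li := (PySem.List.enumerate cipher.toList).foldl
    (fun li p => pvColAppend li (PySem.Int.mod p.1 key_length) p.2) li0
  (PySem.List.pyRange 0 key_length 1).map
    (fun i => PySem.Int.mod (pvLettreFreqMax (PySem.List.pyGetD li i []) - 4) 26)

-- ===== PORT B =====
-- sum(1 for p in range(i, n, key_length) if cipher[p] == alphabet[j]): a 0/1-sum over the
-- strided range IS countP; the positions drawn from the range are in bounds, so pyGetD's
-- default is never used (Python's cipher[p] cannot raise here).
def pvColCount (cs : List Char) (n k i : Int) (c : Char) : Int :=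
  ((PySem.List.pyRange i n k).countP (fun p => PySem.List.pyGetD cs p ' ' == c) : Int)

def clef_par_decalages_alt (cipher : String) (key_length : Int) : List Int :=
  let cs := cipher.toList
  let n : Int := (cs.length : Int)
  (PySem.List.pyRange 0 key_length 1).map (fun i =>
    match PySem.List.max? (PySem.List.pyRange 0 26 1)
        (fun j => pvColCount cs n key_length i (PySem.List.pyGetD pvAlphabet j 'A')) with
    | some best => PySem.Int.mod (best - 4) 26
    | none => 0)  -- unreachable: range(26) is never empty, Python's max always returns

-- ===== PRECONDITION & SPEC =====
-- Pre_ excludes only the inputs on which Python A raises (ZeroDivisionError for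
-- key_length = 0, IndexError for key_length < 0, both only reachable with a nonempty cipher).
def Pre_clef_par_decalages (cipher : String) (key_length : Int) : Prop :=
  0 < key_length ∨ cipher = ""
instance (cipher : String) (key_length : Int) : Decidable (Pre_clef_par_decalages cipher key_length) := by unfold Pre_clef_par_decalages; infer_instance

def pvWitness_clef_par_decalages : String × Int := ("HELLO WORLD!", 3)

def Spec_clef_par_decalages (cipher : String) (key_length : Int) (out : List Int) : Prop := out = clef_par_decalages_alt cipher key_length
instance (cipher : String) (key_length : Int) (out : List Int) : Decidable (Spec_clef_par_decalages cipher key_length out) := by unfold Spec_clef_par_decalages; infer_instance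

-- ===== CLAIM (what is proved, stated in full; the proofs are below) =====
def Claim_equal_clef_par_decalages : Prop := ∀ (cipher : String) (key_length : Int), Dom_clef_par_decalages cipher key_length → Pre_clef_par_decalages cipher key_length → Spec_clef_par_decalages cipher key_length (clef_par_decalages cipher key_length)


-- ===== LEMMAS AND PROOFS =====

-- the characters landing in column i (positions ≡ i mod k), enumerating from s
def pvColChars (k : Int) (txt : List Char) (s i : Int) : List Char :=
  ((PySem.List.enumerate txt s).filter (fun p => PySem.Int.mod p.1 k == i)).map (·.2)

lemma pvColChars_nil (k s i : Int) : pvColChars k [] s i = [] := by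
  simp [pvColChars, PySem.List.enumerate_nil]

lemma pvColChars_cons (k : Int) (c : Char) (t : List Char) (s i : Int) :
    pvColChars k (c :: t) s i =
      if PySem.Int.mod s k = i then c :: pvColChars k t (s + 1) i
      else pvColChars k t (s + 1) i := by
  rw [pvColChars, PySem.List.enumerate_cons, List.filter_cons]
  by_cases h : PySem.Int.mod s k = i <;> simp [h, pvColChars]

lemma pvFoldA (k : Int) (hk : 0 < k) (txt : List Char) : ∀ (s : Int) (li : List (List Char))
    (hlen : li.length = k.toNat),
    (PySem.List.enumerate txt s).foldl (fun li p => pvColAppend li (PySem.Int.mod p.1 k) p.2) li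
    = li.mapIdx (fun i col => col ++ pvColChars k txt s (i : Int)) := by
  induction txt with
  | nil =>
    intro s li _
    rw [PySem.List.enumerate_nil, List.foldl_nil]
    apply List.ext_getElem (by simp)
    intro n h1 h2
    simp [List.getElem_mapIdx, pvColChars_nil]
  | cons c t ih =>
    intro s li hlen
    rw [PySem.List.enumerate_cons, List.foldl_cons]
    have hr0 : 0 ≤ PySem.Int.mod s k := PySem.Int.mod_nonneg s hk
    have hrk : PySem.Int.mod s k < k := PySem.Int.mod_lt s hk
    have hrlen : (PySem.Int.mod s k).toNat < li.length := by omega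
    have hca : pvColAppend li (PySem.Int.mod s k) c
        = li.set (PySem.Int.mod s k).toNat (li[(PySem.Int.mod s k).toNat] ++ [c]) := by
      rw [pvColAppend, PySem.List.pySetD_of_nonneg li _ hr0,
        PySem.List.pyGetD_eq_getElem li [] hr0 (by omega)]
    rw [hca, ih (s + 1) _ (by simpa using hlen)]
    apply List.ext_getElem (by simp)
    intro n h1 h2
    simp only [List.getElem_mapIdx, List.getElem_set, pvColChars_cons]
    by_cases hn : (PySem.Int.mod s k).toNat = n
    · have : PySem.Int.mod s k = (n : Int) := by omega
      simp [hn, this]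
    · have : ¬(PySem.Int.mod s k = (n : Int)) := by omega
      simp [hn, this]

-- enumerate as an indexed range (the default ' ' is never read: q < txt.length)
lemma pvEnumerate_eq (txt : List Char) : ∀ (s : Int),
    PySem.List.enumerate txt s
      = (List.range txt.length).map (fun (q : Nat) => (s + (q : Int), txt.getD q ' ')) := by
  induction txt with
  | nil => intro s; simp [PySem.List.enumerate_nil]
  | cons c t ih =>
    intro s
    rw [PySem.List.enumerate_cons, ih (s + 1), List.length_cons, List.range_succ_eq_map,
      List.map_cons, List.map_map]
    simp only [Nat.cast_zero, add_zero, List.getD_cons_zero]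
    congr 1
    apply List.map_congr_left
    intro q _
    simp only [Function.comp_apply, Nat.succ_eq_add_one, List.getD_cons_succ]
    congr 1
    push_cast
    ring

-- the strided range(i, n, k) is the mod-k filter of range(n)
lemma pvRange_filter (k i n : Int) (hk : 0 < k) (hi0 : 0 ≤ i) (hik : i < k) :
    PySem.List.pyRange i n k
      = (PySem.List.pyRange 0 n 1).filter (fun p => PySem.Int.mod p k == i) := by
  have hmem : ∀ x : Int, (i ≤ x ∧ x < n ∧ k ∣ x - i) ↔ (0 ≤ x ∧ x < n ∧ PySem.Int.mod x k = i) := by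
    intro x
    have hfd := PySem.Int.floordiv_mul_add_mod x k
    have hr0 : 0 ≤ PySem.Int.mod x k := PySem.Int.mod_nonneg x hk
    have hrk : PySem.Int.mod x k < k := PySem.Int.mod_lt x hk
    constructor
    · rintro ⟨hx1, hx2, m, hm⟩
      refine ⟨by omega, hx2, ?_⟩
      have heq : PySem.Int.mod x k - i = k * (m - PySem.Int.floordiv x k) := by
        linear_combination hm + hfd
      have hz : m - PySem.Int.floordiv x k = 0 := by
        by_contra hne
        rcases lt_or_gt_of_ne hne with h | h
        · have hb := mul_le_mul_of_nonneg_left (show m - PySem.Int.floordiv x k ≤ -1 by omega)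
            (le_of_lt hk)
          rw [mul_neg_one] at hb
          omega
        · have hb := mul_le_mul_of_nonneg_left (show (1 : Int) ≤ m - PySem.Int.floordiv x k by omega)
            (le_of_lt hk)
          rw [mul_one] at hb
          omega
      rw [hz, mul_zero] at heq
      omega
    · rintro ⟨hx0, hx2, hr⟩
      have hfd0 : 0 ≤ PySem.Int.floordiv x k := by
        by_contra hneg
        have hb := mul_le_mul_of_nonneg_right (show PySem.Int.floordiv x k ≤ -1 by omega)
          (le_of_lt hk)
        rw [neg_one_mul] at hb
        omega
      have hbk : 0 ≤ PySem.Int.floordiv x k * k := mul_nonneg hfd0 (le_of_lt hk)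
      exact ⟨by omega, hx2, ⟨PySem.Int.floordiv x k, by linear_combination hr - hfd⟩⟩
  have hpw1 : (PySem.List.pyRange i n k).Pairwise (· < ·) := by
    rw [PySem.List.pyRange_of_pos i n hk]
    rw [List.pairwise_map]
    exact List.pairwise_lt_range.imp (fun {a b} h => by nlinarith [Int.ofNat_lt.mpr h])
  have hpw2 : ((PySem.List.pyRange 0 n 1).filter (fun p => PySem.Int.mod p k == i)).Pairwise (· < ·) := by
    apply List.Pairwise.filter
    rw [PySem.List.pyRange_of_pos 0 n (by omega)]
    rw [List.pairwise_map]
    exact List.pairwise_lt_range.imp (fun {a b} h => by omega)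
  apply List.eq_of_perm_of_sorted (le := (· ≤ ·)) (fun a b _ _ h1 h2 => le_antisymm h1 h2)
    (hpw1.imp le_of_lt) (hpw2.imp le_of_lt)
  apply (List.perm_ext_iff_of_nodup hpw1.nodup hpw2.nodup).mpr
  intro x
  rw [List.mem_filter, PySem.List.mem_pyRange_iff_of_pos hk,
    PySem.List.mem_pyRange_iff_of_pos (show (0:Int) < 1 by omega), hmem x]
  constructor
  · rintro ⟨h1, h2, h3⟩; exact ⟨⟨h1, h2, by omega⟩, by simpa using h3⟩
  · rintro ⟨⟨h1, h2, _⟩, h3⟩; exact ⟨h1, h2, by simpa using h3⟩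

-- B's on-demand strided count equals the count in A's column string
lemma pvCount_eq (k : Int) (hk : 0 < k) (cs : List Char) (i : Int) (hi0 : 0 ≤ i) (hik : i < k)
    (c : Char) :
    pvColCount cs (cs.length : Int) k i c = ((pvColChars k cs 0 i).count c : Int) := by
  unfold pvColCount
  rw [pvRange_filter k i _ hk hi0 hik, List.countP_filter,
    PySem.List.pyRange_zero, List.countP_map]
  unfold pvColChars
  rw [List.count_eq_countP, List.countP_map, pvEnumerate_eq cs 0, List.filter_map,
    List.countP_map, List.countP_filter]
  simp only [Int.toNat_natCast]
  congr 1
  apply List.countP_congr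
  intro q hq
  have hq' : q < cs.length := List.mem_range.mp hq
  simp [Function.comp, PySem.List.pyGetD_natCast, Bool.and_comm]

-- first-argmax over an explicit value list (A: max then first index) equals
-- Python's max(range(n), key=f) (B: first extremal element), for nonempty range
lemma pvArgmaxRange (f : Int → Int) : ∀ n : Nat, 0 < n →
    ∃ bi : Nat, bi < n ∧
      PySem.List.max? ((List.range n).map (fun (j : Nat) => f (j : Int))) (fun y => y) = some (f (bi : Int)) ∧
      PySem.List.index? ((List.range n).map (fun (j : Nat) => f (j : Int))) (f (bi : Int)) = some bi ∧
      PySem.List.max? ((List.range n).map (fun (j : Nat) => (j : Int))) f = some ((bi : Int)) := by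
  intro n
  induction n with
  | zero => omega
  | succ m ih =>
    intro _
    by_cases hm : 0 < m
    · obtain ⟨bi, hbi, hmax, hidx, hB⟩ := ih hm
      simp only [List.range_succ, List.map_append]
      by_cases hlt : f (bi : Int) < f (m : Int)
      · refine ⟨m, by omega, ?_, ?_, ?_⟩
        · simp [PySem.List.max?, List.foldl_append] at hmax ⊢
          rw [hmax]; simp [hlt]
        · have hnot : f (m : Int) ∉ (List.range m).map (fun (j : Nat) => f (j : Int)) := by
            intro hmem
            obtain ⟨j, hj, hje⟩ := List.mem_map.mp hmem
            have hjm := List.mem_range.mp hj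
            have := PySem.List.max?_isMax hmax _ hmem
            omega
          have := PySem.List.index?_append_singleton_self
            ((List.range m).map (fun (j : Nat) => f (j : Int))) (f (m : Int)) hnot
          simpa using this
        · simp [PySem.List.max?, List.foldl_append] at hB ⊢
          rw [hB]; simp [hlt]
      · refine ⟨bi, by omega, ?_, ?_, ?_⟩
        · simp [PySem.List.max?, List.foldl_append] at hmax ⊢
          rw [hmax]; simp [hlt]
        · rw [PySem.List.index?_append_of_mem]
          · exact hidx
          · exact (PySem.List.index?_isSome_iff _ _).mp (by rw [hidx]; rfl)
        · simp [PySem.List.max?, List.foldl_append] at hB ⊢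
          rw [hB]; simp [hlt]
    · have hm0 : m = 0 := by omega
      subst hm0
      exact ⟨0, by omega, by simp [PySem.List.max?],
        by simpa using PySem.List.index?_cons_self (f 0) [],
        by simp [PySem.List.max?]⟩

-- A's histogram is the value list of B's key function over range(26)
lemma pvFreq_eq (col : List Char) :
    pvFreq col = (List.range 26).map (fun (j : Nat) => ((col.count (PySem.List.pyGetD pvAlphabet (j : Int) 'A') : Nat) : Int)) := by
  apply List.ext_getElem (by simp [pvFreq, pvAlphabet])
  intro q h1 h2
  have hq : q < 26 := by simpa [pvFreq, pvAlphabet] using h1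
  simp only [pvFreq, List.getElem_map, List.getElem_range]
  rw [PySem.Dict.getD_counter, PySem.List.pyGetD_natCast]
  have hlen : q < pvAlphabet.length := by simpa [pvAlphabet] using hq
  rw [List.getD_eq_getElem _ _ hlen]

-- per-column equality: A's (lettre_freq_max - 4) % 26 = B's (max(range(26), key) - 4) % 26
lemma pvColEq (col : List Char) :
    (match PySem.List.max? (PySem.List.pyRange 0 26 1)
        (fun j => ((col.count (PySem.List.pyGetD pvAlphabet j 'A') : Nat) : Int)) with
     | some best => PySem.Int.mod (best - 4) 26
     | none => (0 : Int))
    = PySem.Int.mod (pvLettreFreqMax col - 4) 26 := by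
  obtain ⟨bi, hbi, hmax, hidx, hB⟩ :=
    pvArgmaxRange (fun j => ((col.count (PySem.List.pyGetD pvAlphabet j 'A') : Nat) : Int)) 26 (by omega)
  have h26 : PySem.List.pyRange 0 26 1 = (List.range 26).map (fun (j : Nat) => (j : Int)) := by decide
  rw [h26, hB]
  unfold pvLettreFreqMax
  simp only [pvFreq_eq, hmax, hidx]

theorem pvMain : ∀ (cipher : String) (key_length : Int),
    Pre_clef_par_decalages cipher key_length →
    clef_par_decalages cipher key_length = clef_par_decalages_alt cipher key_length := by
  intro cipher k hpre
  by_cases hk : 0 < k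
  · simp only [clef_par_decalages, clef_par_decalages_alt]
    have hlenR : (PySem.List.pyRange 0 k 1).length = k.toNat := by
      simp [PySem.List.length_pyRange_one]
    rw [pvFoldA k hk cipher.toList 0 _ (by simp [hlenR])]
    apply List.ext_getElem (by simp)
    intro n h1 h2
    have hn : n < k.toNat := by simpa [hlenR] using h1
    simp only [List.getElem_map, PySem.List.getElem_pyRange_one, zero_add,
      PySem.List.pyGetD_natCast]
    rw [List.getD_eq_getElem _ _ (by simp [hlenR, hn])]
    simp only [List.getElem_mapIdx, List.getElem_map, List.nil_append]
    rw [← pvColEq (pvColChars k cipher.toList 0 (n : Int))]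
    have hkey : (fun j => pvColCount cipher.toList (cipher.toList.length : Int) k (n : Int)
          (PySem.List.pyGetD pvAlphabet j 'A'))
        = (fun j => (((pvColChars k cipher.toList 0 (n : Int)).count
            (PySem.List.pyGetD pvAlphabet j 'A') : Nat) : Int)) := by
      funext j
      exact pvCount_eq k hk cipher.toList (n : Int) (by omega) (by omega) _
    rw [hkey]
  · have hcip : cipher = "" := by
      cases hpre with
      | inl h => exact absurd h hk
      | inr h => exact h
    subst hcip
    have hnil : PySem.List.pyRange 0 k 1 = [] :=
      PySem.List.pyRange_one_eq_nil (by omega)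
    simp [clef_par_decalages, clef_par_decalages_alt, hnil, PySem.List.enumerate_nil]

-- ===== VERDICT (by name: the statements are the Claim_ definitions above) =====
theorem clef_par_decalages_spec : Claim_equal_clef_par_decalages := by
  intro cipher key_length _ hpre
  unfold Spec_clef_par_decalages
  exact pvMain cipher key_length hpre
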